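-- pv_equiv track=rewrite | github.com/OTKRyu/algorithm_problem_solving | basic/programmers_92334.py | solution
-- ===== SOURCE A (Python) =====
-- def solution(id_list, reports, k):
--     counts = {}
--     id_report_list = {}
--     for report in reports:
--         reporter, reported = report.split(' ')
--         if counts.get(reported):
--             counts[reported].add(reporter)
--         else:
--             tmp = set()
--             tmp.add(reporter)
--             counts[reported] = tmp
--         if id_report_list.get(reporter):
--             id_report_list[reporter].append(reported)
--         else:
--             id_report_list[reporter] = [reported]
--     answer = []
--     for id in id_list:
--         if id_report_list.get(id):
--             tmps = list(set(id_report_list.get(id)))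
--             cnt = 0
--             for tmp in tmps:
--                 if counts.get(tmp) and len(counts.get(tmp)) >= k:
--                     cnt += 1
--             answer.append(cnt)
--         else:
--             answer.append(0)
--
--     return answer
-- ===== SOURCE B (Python) =====
-- def solution(id_list, reports, k):
--     pairs = dict.fromkeys(tuple(report.split(' ')) for report in reports)
--     counts = {}
--     for reporter, reported in pairs:
--         counts[reported] = counts.get(reported, 0) + 1
--     result = {}
--     for reporter, reported in pairs:
--         if counts.get(reported, 0) >= k:
--             result[reporter] = result.get(reporter, 0) + 1
--     return [result.get(i, 0) for i in id_list]
-- ===== Notes on version B (the rewrite author's own statement) =====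
-- stated objective: simpler
-- what changed: Instead of A's two per-id dicts (reported -> set of reporters, reporter -> list of reporteds) with a per-id dedup-and-rescan, B deduplicates the (reporter, reported) pairs once, counts distinct reporters per reported in one pass, and accumulates each reporter's mail count in a single pass over the unique pairs.
import Mathlib
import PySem

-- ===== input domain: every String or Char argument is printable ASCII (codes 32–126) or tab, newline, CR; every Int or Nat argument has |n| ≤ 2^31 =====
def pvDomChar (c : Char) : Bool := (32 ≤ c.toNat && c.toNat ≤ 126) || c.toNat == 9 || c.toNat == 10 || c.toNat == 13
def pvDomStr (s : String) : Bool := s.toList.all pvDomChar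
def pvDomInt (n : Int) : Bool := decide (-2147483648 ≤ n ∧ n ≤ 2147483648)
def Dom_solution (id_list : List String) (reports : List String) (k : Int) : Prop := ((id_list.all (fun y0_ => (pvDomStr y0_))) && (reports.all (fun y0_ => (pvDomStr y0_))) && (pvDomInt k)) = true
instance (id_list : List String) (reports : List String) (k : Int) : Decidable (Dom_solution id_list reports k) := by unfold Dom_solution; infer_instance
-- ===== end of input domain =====

-- B replaces A's per-id rescan of its report list by one pass over the deduplicated
-- (reporter, reported) pairs, accumulating each reporter's mail count directly (objective: simpler).

-- shared helper: 'reporter, reported = report.split(' ')' (exact under Pre_: exactly two fields)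
def pvParse (report : String) : String × String :=
  let parts := (PySem.Str.split? report " ").getD []
  (parts.getD 0 "", parts.getD 1 "")

-- ===== PORT A =====
def solution (id_list : List String) (reports : List String) (k : Int) : List Int :=
  let st := reports.foldl
    (fun (st : PySem.Dict String (PySem.Set String) × PySem.Dict String (List String)) report =>
      let reporter := (pvParse report).1
      let reported := (pvParse report).2
      let counts :=
        match st.1.get? reported with
        | some s =>
          if s ≠ [] then st.1.insert reported (PySem.Set.add s reporter)
          else st.1.insert reported (PySem.Set.add PySem.Set.empty reporter)
        | none => st.1.insert reported (PySem.Set.add PySem.Set.empty reporter)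
      let idr :=
        match st.2.get? reporter with
        | some l =>
          if l ≠ [] then st.2.insert reporter (l ++ [reported])
          else st.2.insert reporter [reported]
        | none => st.2.insert reporter [reported]
      (counts, idr))
    (PySem.Dict.empty, PySem.Dict.empty)
  id_list.foldl
    (fun answer id =>
      match st.2.get? id with
      | some l =>
        if l ≠ [] then
          let tmps : PySem.Set String := PySem.Set.ofList l
          let cnt : Int := tmps.foldl
            (fun cnt tmp =>
              match st.1.get? tmp with
              | some s => if s ≠ [] ∧ k ≤ (s.length : Int) then cnt + 1 else cnt
              | none => cnt) 0
          answer ++ [cnt]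
        else answer ++ [(0 : Int)]
      | none => answer ++ [(0 : Int)]) []

-- ===== PORT B =====
def solution_alt (id_list : List String) (reports : List String) (k : Int) : List Int :=
  let pairs := PySem.List.dedup (reports.map pvParse)
  let counts := pairs.foldl
    (fun (d : PySem.Dict String Int) p => d.insert p.2 (d.getD p.2 0 + 1)) PySem.Dict.empty
  let result := pairs.foldl
    (fun (d : PySem.Dict String Int) p =>
      if k ≤ counts.getD p.2 0 then d.insert p.1 (d.getD p.1 0 + 1) else d) PySem.Dict.empty
  id_list.map (fun i => result.getD i 0)

-- ===== PRECONDITION & SPEC =====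
-- Pre_ excludes exactly the reports on which A's unpacking 'reporter, reported = report.split(' ')'
-- raises ValueError (not exactly two space-separated fields); B raises there too.
def Pre_solution (id_list : List String) (reports : List String) (k : Int) : Prop :=
  ∀ r ∈ reports, ((PySem.Str.split? r " ").getD []).length = 2
instance (id_list : List String) (reports : List String) (k : Int) : Decidable (Pre_solution id_list reports k) := by unfold Pre_solution; infer_instance

def pvWitness_solution : List String × List String × Int :=
  (["muzi", "frodo", "apeach"], ["muzi frodo", "apeach frodo", "muzi frodo"], 1)

def Spec_solution (id_list : List String) (reports : List String) (k : Int) (out : List Int) : Prop := out = solution_alt id_list reports k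
instance (id_list : List String) (reports : List String) (k : Int) (out : List Int) : Decidable (Spec_solution id_list reports k out) := by unfold Spec_solution; infer_instance

-- ===== CLAIM (what is proved, stated in full; the proofs are below) =====
def Claim_equal_solution : Prop := ∀ (id_list : List String) (reports : List String) (k : Int), Dom_solution id_list reports k → Pre_solution id_list reports k → Spec_solution id_list reports k (solution id_list reports k)

-- ===== LEMMAS AND PROOFS =====

-- the number of distinct reporters of t, as A computes it
def pvRep (P : List (String × String)) (t : String) : PySem.Set String :=
  PySem.Set.ofList ((P.filter (fun p => p.2 == t)).map (·.1))

-- A's first-loop branch on counts is an unconditional "insert the enlarged set"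
theorem stepC_eq (d : PySem.Dict String (PySem.Set String)) (r t : String) :
    (match d.get? t with
      | some s =>
        if s ≠ [] then d.insert t (PySem.Set.add s r)
        else d.insert t (PySem.Set.add PySem.Set.empty r)
      | none => d.insert t (PySem.Set.add PySem.Set.empty r)) =
    d.insert t (PySem.Set.add (d.getD t []) r) := by
  rcases h : d.get? t with _ | s
  · simp [PySem.Dict.getD_of_get?_eq_none (h := h), PySem.Set.empty]
  · rw [PySem.Dict.getD_of_get?_eq_some (h := h)]
    rcases s with _ | ⟨x, s⟩ <;> simp [PySem.Set.empty]

-- A's first-loop branch on id_report_list is an unconditional append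
theorem stepR_eq (d : PySem.Dict String (List String)) (r t : String) :
    (match d.get? r with
      | some l =>
        if l ≠ [] then d.insert r (l ++ [t])
        else d.insert r [t]
      | none => d.insert r [t]) =
    d.insert r (d.getD r [] ++ [t]) := by
  rcases h : d.get? r with _ | l
  · simp [PySem.Dict.getD_of_get?_eq_none (h := h)]
  · rw [PySem.Dict.getD_of_get?_eq_some (h := h)]
    rcases l with _ | ⟨x, l⟩ <;> simp

-- invariant of A's counts loop
theorem countsA_getD (ps : List (String × String)) (d : PySem.Dict String (PySem.Set String)) (t : String) :
    (ps.foldl (fun d p => d.insert p.2 (PySem.Set.add (d.getD p.2 []) p.1)) d).getD t [] =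
    PySem.Set.update (d.getD t []) ((ps.filter (fun p => p.2 == t)).map (·.1)) := by
  induction ps generalizing d with
  | nil => simp [PySem.Set.update]
  | cons p ps ih =>
    rw [List.foldl_cons, ih]
    by_cases h : p.2 = t
    · subst h
      simp [PySem.Dict.getD_insert_self, PySem.Set.update_cons]
    · rw [PySem.Dict.getD_insert_of_ne]
      · simp [h]
      · exact fun hh => h hh.symm

-- two Nodup lists with the same members have the same length
theorem length_eq_of_nodup_mem {α : Type} [DecidableEq α] {l₁ l₂ : List α}
    (h₁ : l₁.Nodup) (h₂ : l₂.Nodup) (h : ∀ x, x ∈ l₁ ↔ x ∈ l₂) : l₁.length = l₂.length := by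
  rw [← List.toFinset_card_of_nodup h₁, ← List.toFinset_card_of_nodup h₂]
  congr 1
  ext x
  simp [List.mem_toFinset, h x]

-- counting distinct seconds' partners: |set of reporters of t| = countP over the deduplicated pairs
theorem rep_length_eq_countP (P : List (String × String)) (t : String) :
    (pvRep P t).length = (PySem.Set.ofList P).countP (fun p => p.2 == t) := by
  rw [pvRep, List.countP_eq_length_filter]
  have h2 : ((PySem.Set.ofList P).filter (fun p => p.2 == t)).Nodup :=
    (PySem.Set.nodup_ofList P).filter _
  have hinj : (((PySem.Set.ofList P).filter (fun p => p.2 == t)).map (·.1)).Nodup := by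
    refine h2.map_on ?_
    intro x hx y hy hxy
    simp only [List.mem_filter, beq_iff_eq] at hx hy
    exact Prod.ext hxy (hx.2.trans hy.2.symm)
  have hmem : ∀ r, r ∈ PySem.Set.ofList ((P.filter (fun p => p.2 == t)).map (·.1)) ↔
      r ∈ ((PySem.Set.ofList P).filter (fun p => p.2 == t)).map (·.1) := by
    intro r
    simp only [List.mem_filter, List.mem_map, PySem.Set.mem_ofList, beq_iff_eq]
  calc (PySem.Set.ofList ((P.filter (fun p => p.2 == t)).map (·.1))).length
      = (((PySem.Set.ofList P).filter (fun p => p.2 == t)).map (·.1)).length :=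
        length_eq_of_nodup_mem (PySem.Set.nodup_ofList _) hinj hmem
    _ = ((PySem.Set.ofList P).filter (fun p => p.2 == t)).length := List.length_map ..

-- per-id central lemma: counting distinct reporteds of id satisfying q = counting deduplicated pairs
theorem idCount (P : List (String × String)) (a : String) (q : String → Bool) :
    (PySem.Set.ofList ((P.filter (fun p => p.1 == a)).map (·.2))).countP q =
    (PySem.Set.ofList P).countP (fun p => p.1 == a && q p.2) := by
  rw [List.countP_eq_length_filter, List.countP_eq_length_filter]
  have h2 : ((PySem.Set.ofList P).filter (fun p => p.1 == a && q p.2)).Nodup :=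
    (PySem.Set.nodup_ofList P).filter _
  have hinj : (((PySem.Set.ofList P).filter (fun p => p.1 == a && q p.2)).map (·.2)).Nodup := by
    refine h2.map_on ?_
    intro x hx y hy hxy
    simp only [List.mem_filter, Bool.and_eq_true, beq_iff_eq] at hx hy
    exact Prod.ext (hx.2.1.trans hy.2.1.symm) hxy
  have hmem : ∀ t, t ∈ (PySem.Set.ofList ((P.filter (fun p => p.1 == a)).map (·.2))).filter q ↔
      t ∈ ((PySem.Set.ofList P).filter (fun p => p.1 == a && q p.2)).map (·.2) := by
    intro t
    simp only [List.mem_filter, List.mem_map, PySem.Set.mem_ofList, Bool.and_eq_true, beq_iff_eq]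
    constructor
    · rintro ⟨⟨p, hp, rfl⟩, hq⟩
      exact ⟨p, ⟨hp.1, hp.2, hq⟩, rfl⟩
    · rintro ⟨p, ⟨hp, ha, hq⟩, rfl⟩
      exact ⟨⟨p, ⟨hp, ha⟩, rfl⟩, hq⟩
  calc ((PySem.Set.ofList ((P.filter (fun p => p.1 == a)).map (·.2))).filter q).length
      = (((PySem.Set.ofList P).filter (fun p => p.1 == a && q p.2)).map (·.2)).length :=
        length_eq_of_nodup_mem ((PySem.Set.nodup_ofList _).filter q) hinj hmem
    _ = ((PySem.Set.ofList P).filter (fun p => p.1 == a && q p.2)).length := List.length_map ..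

-- A's report-loop body and answer-loop body, named (definitionally equal to the port's lambdas)
def stepA (st : PySem.Dict String (PySem.Set String) × PySem.Dict String (List String)) (report : String) :
    PySem.Dict String (PySem.Set String) × PySem.Dict String (List String) :=
  let reporter := (pvParse report).1
  let reported := (pvParse report).2
  let counts :=
    match st.1.get? reported with
    | some s =>
      if s ≠ [] then st.1.insert reported (PySem.Set.add s reporter)
      else st.1.insert reported (PySem.Set.add PySem.Set.empty reporter)
    | none => st.1.insert reported (PySem.Set.add PySem.Set.empty reporter)
  let idr :=
    match st.2.get? reporter with
    | some l =>
      if l ≠ [] then st.2.insert reporter (l ++ [reported])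
      else st.2.insert reporter [reported]
    | none => st.2.insert reporter [reported]
  (counts, idr)

def pvAnsA (counts : PySem.Dict String (PySem.Set String)) (idr : PySem.Dict String (List String))
    (k : Int) (answer : List Int) (id : String) : List Int :=
  match idr.get? id with
  | some l =>
    if l ≠ [] then
      let tmps : PySem.Set String := PySem.Set.ofList l
      let cnt : Int := tmps.foldl
        (fun cnt tmp =>
          match counts.get? tmp with
          | some s => if s ≠ [] ∧ k ≤ (s.length : Int) then cnt + 1 else cnt
          | none => cnt) 0
      answer ++ [cnt]
    else answer ++ [(0 : Int)]
  | none => answer ++ [(0 : Int)]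

theorem solution_unfold (id_list reports : List String) (k : Int) :
    solution id_list reports k =
      id_list.foldl
        (pvAnsA (reports.foldl stepA (PySem.Dict.empty, PySem.Dict.empty)).1
          (reports.foldl stepA (PySem.Dict.empty, PySem.Dict.empty)).2 k) [] := rfl

theorem stepA_eq : stepA = fun st report =>
    (st.1.insert (pvParse report).2 (PySem.Set.add (st.1.getD (pvParse report).2 []) (pvParse report).1),
     st.2.insert (pvParse report).1 (st.2.getD (pvParse report).1 [] ++ [(pvParse report).2])) := by
  funext st report
  unfold stepA
  dsimp only
  rw [stepC_eq, stepR_eq]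

-- A's two dicts after the report loop
theorem foldA_fst (reports : List String) (t : String) :
    (reports.foldl stepA (PySem.Dict.empty, PySem.Dict.empty)).1.getD t [] =
      pvRep (reports.map pvParse) t := by
  rw [stepA_eq, PySem.List.foldl_prod_mk
      (f := fun (d : PySem.Dict String (PySem.Set String)) report =>
        d.insert (pvParse report).2 (PySem.Set.add (d.getD (pvParse report).2 []) (pvParse report).1))
      (g := fun (d : PySem.Dict String (List String)) report =>
        d.insert (pvParse report).1 (d.getD (pvParse report).1 [] ++ [(pvParse report).2]))]
  dsimp only
  rw [← List.foldl_map (f := pvParse)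
      (g := fun (d : PySem.Dict String (PySem.Set String)) p =>
        d.insert p.2 (PySem.Set.add (d.getD p.2 []) p.1)),
    countsA_getD, PySem.Dict.getD_empty, PySem.Set.update_nil_left, pvRep]

theorem foldA_snd (reports : List String) (i : String) :
    (reports.foldl stepA (PySem.Dict.empty, PySem.Dict.empty)).2.getD i [] =
      ((reports.map pvParse).filter (fun p => p.1 == i)).map (·.2) := by
  rw [stepA_eq, PySem.List.foldl_prod_mk
      (f := fun (d : PySem.Dict String (PySem.Set String)) report =>
        d.insert (pvParse report).2 (PySem.Set.add (d.getD (pvParse report).2 []) (pvParse report).1))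
      (g := fun (d : PySem.Dict String (List String)) report =>
        d.insert (pvParse report).1 (d.getD (pvParse report).1 [] ++ [(pvParse report).2]))]
  dsimp only
  rw [← List.foldl_map (f := pvParse)
      (g := fun (d : PySem.Dict String (List String)) p =>
        d.insert p.1 (d.getD p.1 [] ++ [p.2]))]
  show ((reports.map pvParse).foldl
      (fun (d : PySem.Dict String (List String)) p =>
        d.modify p.1 [] (· ++ [p.2])) PySem.Dict.empty).getD i [] = _
  rw [PySem.Dict.getD_foldl_modify_append, PySem.Dict.getD_empty, List.nil_append]

-- A's answer-loop body appends one closed-form value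
theorem pvAnsA_eq (c : PySem.Dict String (PySem.Set String)) (r : PySem.Dict String (List String))
    (k : Int) (ans : List Int) (id : String) :
    pvAnsA c r k ans id = ans ++
      [((PySem.Set.ofList (r.getD id [])).countP
          (fun t => decide (c.getD t [] ≠ [] ∧ k ≤ ((c.getD t []).length : Int))) : Int)] := by
  unfold pvAnsA
  have hin : (fun (cnt : Int) tmp =>
      match c.get? tmp with
      | some s => if s ≠ [] ∧ k ≤ (s.length : Int) then cnt + 1 else cnt
      | none => cnt) =
      (fun (cnt : Int) tmp =>
        if c.getD tmp [] ≠ [] ∧ k ≤ ((c.getD tmp []).length : Int) then cnt + 1 else cnt) := by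
    funext cnt tmp
    rcases hc : c.get? tmp with _ | s
    · rw [PySem.Dict.getD_of_get?_eq_none (h := hc)]
      simp
    · rw [PySem.Dict.getD_of_get?_eq_some (h := hc)]
  rcases h : r.get? id with _ | l
  · rw [PySem.Dict.getD_of_get?_eq_none (h := h)]
    simp [PySem.Set.ofList]
  · rw [PySem.Dict.getD_of_get?_eq_some (h := h)]
    rcases l with _ | ⟨x, l'⟩
    · simp [PySem.Set.ofList]
    · dsimp only
      rw [if_pos (List.cons_ne_nil x l'), hin, PySem.List.foldl_ite_add_one, zero_add]

-- A's value, in closed form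
theorem solutionA_eq (id_list reports : List String) (k : Int) :
    solution id_list reports k = id_list.map (fun id =>
      (((PySem.Set.ofList (((reports.map pvParse).filter (fun p => p.1 == id)).map (·.2))).countP
        (fun t => decide (pvRep (reports.map pvParse) t ≠ [] ∧
          k ≤ ((pvRep (reports.map pvParse) t).length : Int)))) : Int)) := by
  rw [solution_unfold]
  have hstep : ∀ (ans : List Int) (id : String),
      pvAnsA (reports.foldl stepA (PySem.Dict.empty, PySem.Dict.empty)).1
        (reports.foldl stepA (PySem.Dict.empty, PySem.Dict.empty)).2 k ans id =
      ans ++ [(((PySem.Set.ofList (((reports.map pvParse).filter (fun p => p.1 == id)).map (·.2))).countP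
        (fun t => decide (pvRep (reports.map pvParse) t ≠ [] ∧
          k ≤ ((pvRep (reports.map pvParse) t).length : Int)))) : Int)] := by
    intro ans id
    rw [pvAnsA_eq, foldA_snd]
    congr 2
    refine congrArg _ ?_
    refine List.countP_congr ?_
    intro t _
    simp only [decide_eq_true_eq, foldA_fst]
  calc id_list.foldl (pvAnsA (reports.foldl stepA (PySem.Dict.empty, PySem.Dict.empty)).1
        (reports.foldl stepA (PySem.Dict.empty, PySem.Dict.empty)).2 k) []
      = id_list.foldl (fun ans id => ans ++
          [(((PySem.Set.ofList (((reports.map pvParse).filter (fun p => p.1 == id)).map (·.2))).countP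
            (fun t => decide (pvRep (reports.map pvParse) t ≠ [] ∧
              k ≤ ((pvRep (reports.map pvParse) t).length : Int)))) : Int)]) [] := by
        exact PySem.List.foldl_congr_mem _ _ _ _ (fun acc x _ => hstep acc x)
    _ = _ := by rw [PySem.List.foldl_append_singleton_eq_map, List.nil_append]

-- B's result dict, per reporter
theorem resultB_getD (S : List (String × String)) (C : PySem.Dict String Int) (k : Int)
    (d : PySem.Dict String Int) (i : String) :
    (S.foldl (fun (d : PySem.Dict String Int) p =>
        if k ≤ C.getD p.2 0 then d.insert p.1 (d.getD p.1 0 + 1) else d) d).getD i 0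
      = d.getD i 0 + (S.countP (fun p => (p.1 == i) && decide (k ≤ C.getD p.2 0)) : Int) := by
  induction S generalizing d with
  | nil => simp
  | cons p S ih =>
    rw [List.foldl_cons, List.countP_cons]
    by_cases hk : k ≤ C.getD p.2 0
    · rw [if_pos hk, ih]
      by_cases hi : p.1 = i
      · subst hi
        rw [PySem.Dict.getD_insert_self]
        simp [hk]
        ring
      · rw [PySem.Dict.getD_insert_of_ne (hne := fun hh => hi hh.symm)]
        simp [hi]
    · rw [if_neg hk, ih]
      simp [hk]

-- B's per-id value, in closed form (over the deduplicated pair list)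
theorem solutionB_eq (id_list reports : List String) (k : Int) :
    solution_alt id_list reports k = id_list.map (fun i =>
      (((PySem.List.dedup (reports.map pvParse)).countP
        (fun p => (p.1 == i) &&
          decide (k ≤ ((PySem.List.dedup (reports.map pvParse)).countP (fun r => r.2 == p.2) : Int)))) : Int)) := by
  unfold solution_alt
  have hcounts : ∀ t, ((PySem.List.dedup (reports.map pvParse)).foldl
      (fun (d : PySem.Dict String Int) p => d.insert p.2 (d.getD p.2 0 + 1)) PySem.Dict.empty).getD t 0
      = (((PySem.List.dedup (reports.map pvParse)).countP (fun r => r.2 == t)) : Int) := by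
    intro t
    rw [← List.foldl_map (f := fun p : String × String => p.2)
        (g := fun (d : PySem.Dict String Int) x => d.insert x (d.getD x 0 + 1)),
      PySem.Dict.getD_foldl_insert_add_one, PySem.Dict.getD_empty, zero_add,
      List.count_eq_countP, List.countP_map]
    rfl
  refine List.ext_getElem (by simp) ?_
  intro n h1 h2
  simp only [List.getElem_map]
  rw [resultB_getD, PySem.Dict.getD_empty, zero_add]
  congr 1
  refine List.countP_congr ?_
  intro p _
  simp only [Bool.and_eq_true, decide_eq_true_eq, hcounts p.2]

-- ===== VERDICT (by name: the statement is the Claim_ definition above) =====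
theorem solution_spec : Claim_equal_solution := by
  intro id_list reports k _ _
  unfold Spec_solution
  rw [solutionA_eq, solutionB_eq]
  refine List.map_congr_left ?_
  intro id _
  rw [PySem.List.dedup_eq_ofList]
  refine congrArg _ ?_
  rw [idCount]
  refine List.countP_congr ?_
  intro p hp
  have hpP : p ∈ reports.map pvParse := (PySem.Set.mem_ofList _ _).1 hp
  have hne : pvRep (reports.map pvParse) p.2 ≠ [] := by
    refine List.ne_nil_of_mem (a := p.1) ?_
    rw [pvRep]
    exact (PySem.Set.mem_ofList _ _).2
      (List.mem_map.2 ⟨p, List.mem_filter.2 ⟨hpP, by simp⟩, rfl⟩)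
  have hlen := rep_length_eq_countP (reports.map pvParse) p.2
  simp only [Bool.and_eq_true, decide_eq_true_eq]
  rw [hlen]
  simp [hne]
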